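-- pv_equiv track=rewrite | github.com/branes-ai/graphs | src/graphs/hardware/database/detector.py | _extract_isa_extensions
-- ===== SOURCE A (Python) =====
-- from typing import Optional, List, Dict, Any
--
-- def _extract_isa_extensions(flags: List[str], vendor: str) -> List[str]:
--     """Extract relevant ISA extensions from CPU flags"""
--     extensions = []
--     flags_lower = [f.lower() for f in flags]
--
--     # x86 extensions
--     if vendor in ['Intel', 'AMD']:
--         if 'avx512f' in flags_lower or 'avx512' in flags_lower:
--             extensions.append('AVX512')
--         if 'avx2' in flags_lower:
--             extensions.append('AVX2')
--         if 'avx' in flags_lower and 'AVX2' not in extensions: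
--             extensions.append('AVX')
--         if 'fma' in flags_lower or 'fma3' in flags_lower:
--             extensions.append('FMA3')
--         if 'sse4_2' in flags_lower or 'sse4.2' in flags_lower:
--             extensions.append('SSE4.2')
--         if 'vnni' in flags_lower or 'avx_vnni' in flags_lower:
--             extensions.append('VNNI')
--         if 'amx' in flags_lower or 'amx_tile' in flags_lower:
--             extensions.append('AMX')
--
--     # ARM extensions
--     elif vendor in ['ARM', 'Apple', 'Ampere Computing']:
--         if 'neon' in flags_lower:
--             extensions.append('NEON')
--         if 'sve' in flags_lower:
--             extensions.append('SVE')
--         if 'sve2' in flags_lower: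
--             extensions.append('SVE2')
--         if 'bf16' in flags_lower:
--             extensions.append('BF16')
--         if 'i8mm' in flags_lower:
--             extensions.append('I8MM')
--
--     return extensions
-- ===== SOURCE B (Python) =====
-- from typing import List
--
-- # Table-driven: each rule = (label, positive aliases, negative aliases);
-- # label is emitted when some positive alias is present and no negative alias is.
-- _X86_RULES = [
--     ('AVX512', ['avx512f', 'avx512'], []),
--     ('AVX2', ['avx2'], []),
--     ('AVX', ['avx'], ['avx2']),
--     ('FMA3', ['fma', 'fma3'], []),
--     ('SSE4.2', ['sse4_2', 'sse4.2'], []),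
--     ('VNNI', ['vnni', 'avx_vnni'], []),
--     ('AMX', ['amx', 'amx_tile'], []),
-- ]
-- _ARM_RULES = [
--     ('NEON', ['neon'], []),
--     ('SVE', ['sve'], []),
--     ('SVE2', ['sve2'], []),
--     ('BF16', ['bf16'], []),
--     ('I8MM', ['i8mm'], []),
-- ]
-- _VENDOR_RULES = {
--     'Intel': _X86_RULES, 'AMD': _X86_RULES,
--     'ARM': _ARM_RULES, 'Apple': _ARM_RULES, 'Ampere Computing': _ARM_RULES,
-- }
--
-- def _extract_isa_extensions(flags: List[str], vendor: str) -> List[str]: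
--     """Extract relevant ISA extensions from CPU flags"""
--     flags_lower = {f.lower() for f in flags}
--     return [label
--             for label, pos, neg in _VENDOR_RULES.get(vendor, [])
--             if any(a in flags_lower for a in pos)
--             and not any(a in flags_lower for a in neg)]
-- ===== Notes on version B (the rewrite author's own statement) =====
-- stated objective: simpler
-- what changed: Replaces the two hard-coded if-chains by a data-driven rule table (label, positive aliases, negative aliases) selected per vendor from a dict and filtered in one comprehension over a set of lowercased flags; the AVX-not-with-AVX2 special case becomes a uniform negative-alias rule.
import Mathlib
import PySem

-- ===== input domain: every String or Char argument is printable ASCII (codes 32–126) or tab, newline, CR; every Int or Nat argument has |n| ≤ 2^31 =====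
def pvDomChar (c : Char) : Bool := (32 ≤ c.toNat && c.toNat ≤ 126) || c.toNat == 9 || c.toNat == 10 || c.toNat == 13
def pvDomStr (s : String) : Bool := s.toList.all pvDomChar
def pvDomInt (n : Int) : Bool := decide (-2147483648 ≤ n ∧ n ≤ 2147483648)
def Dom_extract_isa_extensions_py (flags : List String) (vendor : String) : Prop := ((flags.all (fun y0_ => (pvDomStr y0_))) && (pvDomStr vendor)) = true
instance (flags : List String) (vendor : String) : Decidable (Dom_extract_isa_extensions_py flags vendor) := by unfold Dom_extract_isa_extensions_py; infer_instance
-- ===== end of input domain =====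

-- B replaces A's two hard-coded if-chains by a vendor-keyed rule table (label, positive
-- aliases, negative aliases) filtered in one pass over a set of lowercased flags (objective: simpler).


-- ===== PORT A =====
def extract_isa_extensions_py (flags : List String) (vendor : String) : List String :=
  let extensions : List String := []
  let flags_lower := flags.map PySem.Str.lower
  if vendor ∈ ["Intel", "AMD"] then
    let extensions := if "avx512f" ∈ flags_lower ∨ "avx512" ∈ flags_lower then extensions ++ ["AVX512"] else extensions
    let extensions := if "avx2" ∈ flags_lower then extensions ++ ["AVX2"] else extensions
    let extensions := if "avx" ∈ flags_lower ∧ "AVX2" ∉ extensions then extensions ++ ["AVX"] else extensions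
    let extensions := if "fma" ∈ flags_lower ∨ "fma3" ∈ flags_lower then extensions ++ ["FMA3"] else extensions
    let extensions := if "sse4_2" ∈ flags_lower ∨ "sse4.2" ∈ flags_lower then extensions ++ ["SSE4.2"] else extensions
    let extensions := if "vnni" ∈ flags_lower ∨ "avx_vnni" ∈ flags_lower then extensions ++ ["VNNI"] else extensions
    let extensions := if "amx" ∈ flags_lower ∨ "amx_tile" ∈ flags_lower then extensions ++ ["AMX"] else extensions
    extensions
  else if vendor ∈ ["ARM", "Apple", "Ampere Computing"] then
    let extensions := if "neon" ∈ flags_lower then extensions ++ ["NEON"] else extensions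
    let extensions := if "sve" ∈ flags_lower then extensions ++ ["SVE"] else extensions
    let extensions := if "sve2" ∈ flags_lower then extensions ++ ["SVE2"] else extensions
    let extensions := if "bf16" ∈ flags_lower then extensions ++ ["BF16"] else extensions
    let extensions := if "i8mm" ∈ flags_lower then extensions ++ ["I8MM"] else extensions
    extensions
  else
    extensions

-- ===== PORT B =====
def pvX86Rules : List (String × List String × List String) :=
  [("AVX512", ["avx512f", "avx512"], []),
   ("AVX2", ["avx2"], []),
   ("AVX", ["avx"], ["avx2"]),
   ("FMA3", ["fma", "fma3"], []),
   ("SSE4.2", ["sse4_2", "sse4.2"], []),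
   ("VNNI", ["vnni", "avx_vnni"], []),
   ("AMX", ["amx", "amx_tile"], [])]

def pvArmRules : List (String × List String × List String) :=
  [("NEON", ["neon"], []),
   ("SVE", ["sve"], []),
   ("SVE2", ["sve2"], []),
   ("BF16", ["bf16"], []),
   ("I8MM", ["i8mm"], [])]

def pvVendorRules : PySem.Dict String (List (String × List String × List String)) :=
  PySem.Dict.ofList
    [("Intel", pvX86Rules), ("AMD", pvX86Rules),
     ("ARM", pvArmRules), ("Apple", pvArmRules), ("Ampere Computing", pvArmRules)]

def extract_isa_extensions_py_alt (flags : List String) (vendor : String) : List String :=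
  let flags_lower := PySem.Set.ofList (flags.map PySem.Str.lower)
  (PySem.Dict.getD pvVendorRules vendor []).filterMap (fun r =>
    if (r.2.1.any fun a => flags_lower.contains a) && !(r.2.2.any fun a => flags_lower.contains a)
    then some r.1 else none)

-- ===== PRECONDITION & SPEC =====
def Spec_extract_isa_extensions_py (flags : List String) (vendor : String) (out : List String) : Prop := out = extract_isa_extensions_py_alt flags vendor
instance (flags : List String) (vendor : String) (out : List String) : Decidable (Spec_extract_isa_extensions_py flags vendor out) := by unfold Spec_extract_isa_extensions_py; infer_instance

-- ===== CLAIM (what is proved, stated in full; the proofs are below) =====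
def Claim_equal_extract_isa_extensions_py : Prop := ∀ (flags : List String) (vendor : String), Dom_extract_isa_extensions_py flags vendor → Spec_extract_isa_extensions_py flags vendor (extract_isa_extensions_py flags vendor)

-- ===== LEMMAS AND PROOFS =====
set_option maxHeartbeats 2000000 in
lemma getD_vendor_other (vendor : String)
    (h1 : vendor ≠ "Intel") (h2 : vendor ≠ "AMD") (h3 : vendor ≠ "ARM")
    (h4 : vendor ≠ "Apple") (h5 : vendor ≠ "Ampere Computing") :
    PySem.Dict.getD pvVendorRules vendor [] = [] := by
  simp [pvVendorRules, PySem.Dict.ofList, PySem.Dict.update,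
    PySem.Dict.getD_insert, PySem.Dict.getD_empty, h1, h2, h3, h4, h5]

set_option maxHeartbeats 1000000 in
lemma x86_eq (flags : List String) :
    (let extensions : List String := []
     let flags_lower := flags.map PySem.Str.lower
     let extensions := if "avx512f" ∈ flags_lower ∨ "avx512" ∈ flags_lower then extensions ++ ["AVX512"] else extensions
     let extensions := if "avx2" ∈ flags_lower then extensions ++ ["AVX2"] else extensions
     let extensions := if "avx" ∈ flags_lower ∧ "AVX2" ∉ extensions then extensions ++ ["AVX"] else extensions
     let extensions := if "fma" ∈ flags_lower ∨ "fma3" ∈ flags_lower then extensions ++ ["FMA3"] else extensions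
     let extensions := if "sse4_2" ∈ flags_lower ∨ "sse4.2" ∈ flags_lower then extensions ++ ["SSE4.2"] else extensions
     let extensions := if "vnni" ∈ flags_lower ∨ "avx_vnni" ∈ flags_lower then extensions ++ ["VNNI"] else extensions
     let extensions := if "amx" ∈ flags_lower ∨ "amx_tile" ∈ flags_lower then extensions ++ ["AMX"] else extensions
     extensions) =
    pvX86Rules.filterMap (fun r =>
      if (r.2.1.any fun a => (PySem.Set.ofList (flags.map PySem.Str.lower)).contains a) &&
         !(r.2.2.any fun a => (PySem.Set.ofList (flags.map PySem.Str.lower)).contains a)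
      then some r.1 else none) := by
  by_cases h1 : ("avx512f" ∈ List.map PySem.Str.lower flags ∨ "avx512" ∈ List.map PySem.Str.lower flags) <;>
  by_cases h2 : "avx2" ∈ List.map PySem.Str.lower flags <;>
  by_cases h3 : "avx" ∈ List.map PySem.Str.lower flags <;>
  by_cases h4 : ("fma" ∈ List.map PySem.Str.lower flags ∨ "fma3" ∈ List.map PySem.Str.lower flags) <;>
  by_cases h5 : ("sse4_2" ∈ List.map PySem.Str.lower flags ∨ "sse4.2" ∈ List.map PySem.Str.lower flags) <;>
  by_cases h6 : ("vnni" ∈ List.map PySem.Str.lower flags ∨ "avx_vnni" ∈ List.map PySem.Str.lower flags) <;>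
  by_cases h7 : ("amx" ∈ List.map PySem.Str.lower flags ∨ "amx_tile" ∈ List.map PySem.Str.lower flags) <;>
    simp [pvX86Rules, h1, h2, h3, h4, h5, h6, h7, -List.mem_map]

set_option maxHeartbeats 1000000 in
lemma arm_eq (flags : List String) :
    (let extensions : List String := []
     let flags_lower := flags.map PySem.Str.lower
     let extensions := if "neon" ∈ flags_lower then extensions ++ ["NEON"] else extensions
     let extensions := if "sve" ∈ flags_lower then extensions ++ ["SVE"] else extensions
     let extensions := if "sve2" ∈ flags_lower then extensions ++ ["SVE2"] else extensions
     let extensions := if "bf16" ∈ flags_lower then extensions ++ ["BF16"] else extensions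
     let extensions := if "i8mm" ∈ flags_lower then extensions ++ ["I8MM"] else extensions
     extensions) =
    pvArmRules.filterMap (fun r =>
      if (r.2.1.any fun a => (PySem.Set.ofList (flags.map PySem.Str.lower)).contains a) &&
         !(r.2.2.any fun a => (PySem.Set.ofList (flags.map PySem.Str.lower)).contains a)
      then some r.1 else none) := by
  by_cases h1 : "neon" ∈ List.map PySem.Str.lower flags <;>
  by_cases h2 : "sve" ∈ List.map PySem.Str.lower flags <;>
  by_cases h3 : "sve2" ∈ List.map PySem.Str.lower flags <;>
  by_cases h4 : "bf16" ∈ List.map PySem.Str.lower flags <;>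
  by_cases h5 : "i8mm" ∈ List.map PySem.Str.lower flags <;>
    simp [pvArmRules, h1, h2, h3, h4, h5, -List.mem_map]

lemma extract_eq (flags : List String) (vendor : String) :
    extract_isa_extensions_py flags vendor = extract_isa_extensions_py_alt flags vendor := by
  unfold extract_isa_extensions_py extract_isa_extensions_py_alt
  by_cases hx : vendor ∈ ["Intel", "AMD"]
  · rw [if_pos hx]
    have hg : PySem.Dict.getD pvVendorRules vendor [] = pvX86Rules := by
      simp only [List.mem_cons, List.not_mem_nil, or_false] at hx
      rcases hx with h | h <;> subst h <;> rfl
    rw [hg]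
    exact x86_eq flags
  · rw [if_neg hx]
    by_cases ha : vendor ∈ ["ARM", "Apple", "Ampere Computing"]
    · rw [if_pos ha]
      have hg : PySem.Dict.getD pvVendorRules vendor [] = pvArmRules := by
        simp only [List.mem_cons, List.not_mem_nil, or_false] at ha
        rcases ha with h | h | h <;> subst h <;> rfl
      rw [hg]
      exact arm_eq flags
    · rw [if_neg ha]
      simp only [List.mem_cons, List.not_mem_nil, or_false, not_or] at hx ha
      rw [getD_vendor_other vendor hx.1 hx.2 ha.1 ha.2.1 ha.2.2]
      rfl

-- ===== VERDICT (by name: the statement is the Claim_ definition above) =====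
theorem extract_isa_extensions_py_spec : Claim_equal_extract_isa_extensions_py := by
  intro flags vendor _
  exact extract_eq flags vendor
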